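-- pv_equiv track=rewrite | github.com/shamshad-npti/codegoda | 2023/3-agojis-tour-plan/solution.py | dfs
-- ===== SOURCE A (Python) =====
-- def chr_to_inx(c):
--     return 25 - (ord(c) - ord('A'))
--
-- def dfs(tree, S):
--     stack = [0]
--     node_status = [0] * len(tree)
--     node_status[0] = 1
--     while stack:
--         u = stack[-1]
--         visit = [v for v in tree[u] if node_status[v] == 0]
--         if visit:
--             for v in visit:
--                 stack.append(v)
--                 node_status[v] = 1
--         else:
--             max1, max2, max3 = [[0] * 26 for _ in range(3)]
--             for v in tree[u]:
--                 if node_status[v] == 1: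
--                     continue
--                 current, subtree = node_status[v]
--                 max3 = max(subtree, max3)
--                 if current > max1:
--                     max2 = max1
--                     max1 = current
--                 elif current > max2:
--                     max2 = current
--             max1[chr_to_inx(S[u])] += 1
--             merged = [max1[i] + max2[i] for i in range(26)]
--             node_status[u] = max1, max(merged, max3)
--             stack.pop()
--     return node_status[0]
-- ===== SOURCE B (Python) =====
-- # B: recursive post-order (rec helper over the shared visit array) replacing A's
-- # explicit-stack loop; plain int statuses with a separate results table instead of
-- # A's heterogeneous node_status cells.
-- def chr_to_inx(c):
--     return 25 - (ord(c) - ord('A'))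
--
-- def dfs(tree, S):
--     n = len(tree)
--     status = [0] * n      # 0 = unseen, 1 = marked, 2 = finished
--     res = [None] * n
--
--     def rec(u):
--         kids = [v for v in tree[u] if status[v] == 0]
--         for v in kids:
--             status[v] = 1
--         for v in reversed(kids):
--             rec(v)
--         max1, max2, max3 = [[0] * 26 for _ in range(3)]
--         for v in tree[u]:
--             if status[v] != 2:
--                 continue
--             current, subtree = res[v]
--             max3 = max(subtree, max3)
--             if current > max1:
--                 max2 = max1
--                 max1 = current
--             elif current > max2:
--                 max2 = current
--         max1[chr_to_inx(S[u])] += 1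
--         merged = [max1[i] + max2[i] for i in range(26)]
--         res[u] = (max1, max(merged, max3))
--         status[u] = 2
--
--     status[0] = 1
--     rec(0)
--     return res[0]
-- ===== Notes on version B (the rewrite author's own statement) =====
-- stated objective: alternative
-- what changed: A runs one explicit-stack while loop over a heterogeneous node_status array (0, 1, or a result tuple) with re-scanned visit lists; B replaces the stack machine by a recursive post-order helper rec(u) that marks its unseen neighbours, recurses into them, and combines, with plain int statuses and a separate results table.
import Mathlib
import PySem

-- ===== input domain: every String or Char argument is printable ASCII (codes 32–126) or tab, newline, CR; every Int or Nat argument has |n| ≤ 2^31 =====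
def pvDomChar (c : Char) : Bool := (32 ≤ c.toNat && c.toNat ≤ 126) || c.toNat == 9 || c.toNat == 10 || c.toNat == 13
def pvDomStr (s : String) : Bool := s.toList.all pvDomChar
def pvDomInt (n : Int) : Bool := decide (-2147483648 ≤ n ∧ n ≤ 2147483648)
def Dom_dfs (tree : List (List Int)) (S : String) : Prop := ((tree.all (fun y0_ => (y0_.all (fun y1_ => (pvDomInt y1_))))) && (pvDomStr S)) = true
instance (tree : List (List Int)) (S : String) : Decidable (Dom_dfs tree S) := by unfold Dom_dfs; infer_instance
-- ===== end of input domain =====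

-- B replaces A's explicit-stack while loop (heterogeneous node_status cells) by a
-- recursive post-order helper with int statuses and a separate results table; same
-- asymptotic cost ("alternative" objective). Return-value equivalence only: neither
-- program mutates its arguments. Both Pythons mutate their own internal lists in
-- place (a child's stored count vector is bumped through an alias); both ports
-- model this exactly with an explicit heap of 'current' vectors addressed by refs.

-- ===== PORT A =====
-- shared module-level helper chr_to_inx
def pvChrToInx (c : Char) : Int := 25 - ((c.toNat : Int) - 65)

-- status cell of A's node_status: 0, 1, or a (current, subtree) tuple; the mutable
-- 'current' list object is represented by a ref into the heap, 'subtree' by value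
-- (subtree vectors are never mutated after being stored)
inductive PvSt : Type
  | zero : PvSt
  | one : PvSt
  | done : Nat → List Int → PvSt
deriving DecidableEq, Repr

def pvZeros26 : List Int := List.replicate 26 0

-- Python list lexicographic '<' on int lists (as used by 'max' and '>')
def pvLexLt : List Int → List Int → Bool
  | [], [] => false
  | [], _ :: _ => true
  | _ :: _, [] => false
  | a :: as, b :: bs => if a < b then true else if b < a then false else pvLexLt as bs

-- tree[u]  (u is always a valid index when reached; default for totality)
def pvAdj (tree : List (List Int)) (u : Int) : List Int := PySem.List.pyGetD tree u []

-- S[u]  (in range under Pre_; default for totality)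
def pvCharAt (S : String) (u : Int) : Char := (PySem.Str.pyGet? S u).getD 'A'

-- the list object a ref denotes (refs are always in range by construction)
def pvHeapAt (heap : List (List Int)) (r : Nat) : List Int := heap.getD r []

-- max1[chr_to_inx(S[u])] += 1   (Python negative list index wraps; PySem.pySetD is exact)
def pvBump (m1 : List Int) (S : String) (u : Int) : List Int :=
  PySem.List.pySetD m1 (pvChrToInx (pvCharAt S u))
    (PySem.List.pyGetD m1 (pvChrToInx (pvCharAt S u)) 0 + 1)

-- merged = [max1[i] + max2[i] for i in range(26)]
def pvMerged (m1 m2 : List Int) : List Int :=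
  (PySem.List.pyRange 0 26 1).map
    (fun i => PySem.List.pyGetD m1 i 0 + PySem.List.pyGetD m2 i 0)

def pvStGet (st : List PvSt) (v : Int) : PvSt := PySem.List.pyGetD st v PvSt.zero
def pvStSet (st : List PvSt) (v : Int) (x : PvSt) : List PvSt := PySem.List.pySetD st v x

-- one step of A's 'for v in tree[u]' combination loop; max1 and max2 carry the ref
-- they alias (if any), because 'max1[...] += 1' later mutates that shared object
def pvStepA (st : List PvSt) (heap : List (List Int))
    (acc : (List Int × Option Nat) × (List Int × Option Nat) × List Int) (v : Int) :
    (List Int × Option Nat) × (List Int × Option Nat) × List Int :=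
  match pvStGet st v with
  | PvSt.zero => acc          -- cannot occur when the loop runs (visit was empty)
  | PvSt.one => acc           -- 'continue'
  | PvSt.done r s =>
    let cur := pvHeapAt heap r
    let m3' := if pvLexLt s acc.2.2 then acc.2.2 else s
    if pvLexLt acc.1.1 cur then ((cur, some r), acc.1, m3')
    else if pvLexLt acc.2.1.1 cur then (acc.1, (cur, some r), m3')
    else (acc.1, acc.2.1, m3')

-- the 'else' block of A's while loop: the (ref, subtree) stored as node_status[u]
-- plus the updated heap ('max1[...] += 1' mutates the aliased child vector, and
-- merged reads max2 through its alias afterwards — exactly CPython's behaviour)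
def pvFinalizeA (tree : List (List Int)) (S : String) (st : List PvSt)
    (heap : List (List Int)) (u : Int) : (Nat × List Int) × List (List Int) :=
  let t := (pvAdj tree u).foldl (pvStepA st heap) ((pvZeros26, none), (pvZeros26, none), pvZeros26)
  let bumped := pvBump t.1.1 S u
  let rh : Nat × List (List Int) :=
    match t.1.2 with
    | some r => (r, heap.set r bumped)
    | none => (heap.length, heap ++ [bumped])
  let m2res : List Int :=
    match t.2.1.2 with
    | some r2 => pvHeapAt rh.2 r2
    | none => t.2.1.1
  let mg := pvMerged bumped m2res
  ((rh.1, if pvLexLt mg t.2.2 then t.2.2 else mg), rh.2)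

-- countP-based termination lemmas for the stack loop (cited by decreasing_by)
theorem pvCountP_set_le {α : Type} (p : α → Bool) (xs : List α) (k : Nat) (x : α)
    (hx : p x = false) : (xs.set k x).countP p ≤ xs.countP p := by
  induction xs generalizing k with
  | nil => simp
  | cons a l ih =>
    cases k with
    | zero => simp [List.countP_cons, hx]
    | succ k => simp only [List.set_cons_succ, List.countP_cons]; have := ih k; omega

theorem pvCountP_set_lt {α : Type} (p : α → Bool) (xs : List α) (k : Nat) (x : α)
    (hk : k < xs.length) (hy : p (xs.get ⟨k, hk⟩) = true) (hx : p x = false) :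
    (xs.set k x).countP p < xs.countP p := by
  induction xs generalizing k with
  | nil => simp at hk
  | cons a l ih =>
    cases k with
    | zero =>
      simp only [List.get] at hy
      simp [hx, hy]
    | succ k =>
      simp only [List.set_cons_succ, List.countP_cons]
      have := ih k (by simpa using hk) (by simpa using hy)
      omega

theorem pvIdx_lt {n : Nat} {i : Int} {k : Nat} (h : PySem.List.pyIdx? n i = some k) :
    k < n := by
  simp only [PySem.List.pyIdx?] at h
  split_ifs at h <;> simp_all <;> omega

theorem pvCountP_setD_le {α : Type} (p : α → Bool) (xs : List α) (i : Int) (x : α)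
    (hx : p x = false) : (PySem.List.pySetD xs i x).countP p ≤ xs.countP p := by
  cases h : PySem.List.pyIdx? xs.length i with
  | none => simp [PySem.List.pySetD, PySem.List.pySet?, h]
  | some k =>
    simp [PySem.List.pySetD, PySem.List.pySet?, h]
    exact pvCountP_set_le p xs k x hx

theorem pvCountP_setD_lt {α : Type} (p : α → Bool) (xs : List α) (i : Int) (x : α) (d : α)
    (hi : (PySem.List.pyIdx? xs.length i).isSome = true)
    (hy : p (PySem.List.pyGetD xs i d) = true) (hx : p x = false) :
    (PySem.List.pySetD xs i x).countP p < xs.countP p := by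
  cases h : PySem.List.pyIdx? xs.length i with
  | none => rw [h] at hi; simp at hi
  | some k =>
    have hk := pvIdx_lt h
    have hget : PySem.List.pyGetD xs i d = xs.get ⟨k, hk⟩ := by
      simp [PySem.List.pyGetD, PySem.List.pyGet?, h, List.getElem?_eq_getElem hk]
    simp [PySem.List.pySetD, PySem.List.pySet?, h]
    exact pvCountP_set_lt p xs k x hk (by rw [← hget]; exact hy) hx

theorem pvCountP_markFold_le {α : Type} (p : α → Bool) (x : α) (hx : p x = false) :
    ∀ (vs : List Int) (xs : List α),
      (vs.foldl (fun s v => PySem.List.pySetD s v x) xs).countP p ≤ xs.countP p := by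
  intro vs
  induction vs with
  | nil => intro xs; simp
  | cons v vs ih =>
    intro xs
    calc _ ≤ (PySem.List.pySetD xs v x).countP p := ih _
    _ ≤ xs.countP p := pvCountP_setD_le p xs v x hx

-- strict decrease when the marked kid list is nonempty (cited by decreasing_by and the proofs)
theorem pvCountP_mark_lt (tree : List (List Int)) (u : Int) (st : List PvSt)
    (hall : ((pvAdj tree u).all (fun v => (PySem.List.pyIdx? st.length v).isSome)) = true)
    (hne : ¬ (((pvAdj tree u).filter (fun v => pvStGet st v == PvSt.zero)).isEmpty) = true) :
    (((pvAdj tree u).filter (fun v => pvStGet st v == PvSt.zero)).foldl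
      (fun s v => pvStSet s v PvSt.one) st).countP (· == PvSt.zero)
      < st.countP (· == PvSt.zero) := by
  obtain ⟨v, vs, hvv⟩ : ∃ v vs,
      (pvAdj tree u).filter (fun v => pvStGet st v == PvSt.zero) = v :: vs := by
    rcases hlist : (pvAdj tree u).filter (fun v => pvStGet st v == PvSt.zero) with _ | ⟨v, vs⟩
    · rw [hlist] at hne; simp at hne
    · exact ⟨v, vs, rfl⟩
  rw [hvv]
  have hvmem : v ∈ (pvAdj tree u).filter (fun v => pvStGet st v == PvSt.zero) := by
    rw [hvv]; exact List.mem_cons_self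
  have hvz : pvStGet st v == PvSt.zero := (List.mem_filter.mp hvmem).2
  have hvsome : (PySem.List.pyIdx? st.length v).isSome = true := by
    have := List.all_eq_true.mp hall v (List.mem_filter.mp hvmem).1
    simpa using this
  calc ((v :: vs).foldl (fun s w => pvStSet s w PvSt.one) st).countP (· == PvSt.zero)
      ≤ (pvStSet st v PvSt.one).countP (· == PvSt.zero) := by
        exact pvCountP_markFold_le _ _ (by simp) vs _
    _ < st.countP (· == PvSt.zero) :=
        pvCountP_setD_lt _ st v PvSt.one PvSt.zero hvsome
          (by simpa [pvStGet] using hvz) (by simp)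

-- the while loop of A (stack head = Python stack top); '([], [])' final state stands
-- for the IndexError Python raises at node_status[v] for an out-of-range neighbour
def pvLoopA (tree : List (List Int)) (S : String) :
    List Int → List PvSt → List (List Int) → List PvSt × List (List Int)
  | [], st, heap => (st, heap)
  | u :: rest, st, heap =>
    if (pvAdj tree u).all (fun v => (PySem.List.pyIdx? st.length v).isSome) then
      if ((pvAdj tree u).filter (fun v => pvStGet st v == PvSt.zero)).isEmpty then
        pvLoopA tree S rest
          (pvStSet st u (PvSt.done (pvFinalizeA tree S st heap u).1.1
            (pvFinalizeA tree S st heap u).1.2))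
          (pvFinalizeA tree S st heap u).2
      else
        pvLoopA tree S
          (((pvAdj tree u).filter (fun v => pvStGet st v == PvSt.zero)).reverse ++ u :: rest)
          (((pvAdj tree u).filter (fun v => pvStGet st v == PvSt.zero)).foldl
            (fun s v => pvStSet s v PvSt.one) st)
          heap
    else ([], [])
termination_by stack st _ => (st.countP (· == PvSt.zero), stack.length)
decreasing_by
  · have hle : (pvStSet st u (PvSt.done (pvFinalizeA tree S st heap u).1.1
        (pvFinalizeA tree S st heap u).1.2)).countP (· == PvSt.zero)
        ≤ st.countP (· == PvSt.zero) := by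
      apply pvCountP_setD_le; simp
    rcases lt_or_eq_of_le hle with h | h
    · exact Prod.Lex.left _ _ h
    · rw [h]; exact Prod.Lex.right _ (by simp)
  · exact Prod.Lex.left _ _ (pvCountP_mark_lt tree u st (by assumption) (by assumption))

def dfs (tree : List (List Int)) (S : String) : List Int × List Int :=
  if tree.isEmpty then ([], [])    -- len(tree) = 0: 'node_status[0] = 1' raises IndexError
  else
    match pvStGet (pvLoopA tree S [0]
        (PySem.List.pySetD (List.replicate tree.length PvSt.zero) 0 PvSt.one) []).1 0 with
    | PvSt.done r s =>
      (pvHeapAt (pvLoopA tree S [0]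
        (PySem.List.pySetD (List.replicate tree.length PvSt.zero) 0 PvSt.one) []).2 r, s)
    | _ => ([], [])                -- unreachable: node 0 is always finalized

-- ===== PORT B =====
-- B's statuses are plain ints (0/1/2) and its results live in the separate 'res'
-- table ('none' = Python None); the same ref/heap device models list aliasing.
def pvBGet (b : List (Option (Nat × List Int))) (v : Int) : Option (Nat × List Int) :=
  PySem.List.pyGetD b v none
def pvBSet (b : List (Option (Nat × List Int))) (v : Int)
    (x : Option (Nat × List Int)) : List (Option (Nat × List Int)) :=
  PySem.List.pySetD b v x

-- one step of Source B's combine loop ('if status[v] != 2: continue', then read res[v])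
def pvStepB (st : List Int) (res : List (Option (Nat × List Int)))
    (heap : List (List Int))
    (acc : (List Int × Option Nat) × (List Int × Option Nat) × List Int) (v : Int) :
    (List Int × Option Nat) × (List Int × Option Nat) × List Int :=
  if PySem.List.pyGetD st v 0 == 2 then
    match pvBGet res v with
    | some rs =>
      let cur := pvHeapAt heap rs.1
      let m3' := if pvLexLt rs.2 acc.2.2 then acc.2.2 else rs.2
      if pvLexLt acc.1.1 cur then ((cur, some rs.1), acc.1, m3')
      else if pvLexLt acc.2.1.1 cur then (acc.1, (cur, some rs.1), m3')
      else (acc.1, acc.2.1, m3')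
    | none => acc                  -- unreachable: res[v] is set whenever status[v] = 2
  else acc                         -- 'continue'

-- the tail of Source B's rec: combine + bump + merged (identical aliasing bookkeeping)
def pvFinalizeB (tree : List (List Int)) (S : String) (st : List Int)
    (res : List (Option (Nat × List Int))) (heap : List (List Int)) (u : Int) :
    (Nat × List Int) × List (List Int) :=
  let t := (pvAdj tree u).foldl (pvStepB st res heap) ((pvZeros26, none), (pvZeros26, none), pvZeros26)
  let bumped := pvBump t.1.1 S u
  let rh : Nat × List (List Int) :=
    match t.1.2 with
    | some r => (r, heap.set r bumped)
    | none => (heap.length, heap ++ [bumped])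
  let m2res : List Int :=
    match t.2.1.2 with
    | some r2 => pvHeapAt rh.2 r2
    | none => t.2.1.1
  let mg := pvMerged bumped m2res
  ((rh.1, if pvLexLt mg t.2.2 then t.2.2 else mg), rh.2)

-- rec(u) of Source B: collect kids, mark them, recurse into reversed(kids) (the loop is
-- pvRecBList), then combine and store; the fuel argument only makes the recursion
-- total in Lean (tree.length + 1 is proven sufficient by the equivalence proof),
-- 'none' = the IndexError Python raises on an out-of-range neighbour index
mutual
def pvRecB (tree : List (List Int)) (S : String) :
    Nat → Int → List Int × List (Option (Nat × List Int)) × List (List Int) →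
    Option (List Int × List (Option (Nat × List Int)) × List (List Int))
  | 0, _, _ => none
  | Nat.succ f, u, (st, res, heap) =>
    if (pvAdj tree u).all (fun v => (PySem.List.pyIdx? st.length v).isSome) then
      match pvRecBList tree S f
          (((pvAdj tree u).filter (fun v => PySem.List.pyGetD st v 0 == 0)).reverse)
          ((((pvAdj tree u).filter (fun v => PySem.List.pyGetD st v 0 == 0)).foldl
            (fun s v => PySem.List.pySetD s v 1) st), res, heap) with
      | none => none
      | some (st2, res2, h2) =>
        some (PySem.List.pySetD st2 u 2,
          pvBSet res2 u (some (pvFinalizeB tree S st2 res2 h2 u).1),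
          (pvFinalizeB tree S st2 res2 h2 u).2)
    else none
  termination_by f _ _ => (f, 0)

-- 'for v in reversed(kids): rec(v)'
def pvRecBList (tree : List (List Int)) (S : String) :
    Nat → List Int → List Int × List (Option (Nat × List Int)) × List (List Int) →
    Option (List Int × List (Option (Nat × List Int)) × List (List Int))
  | _, [], s => some s
  | f, v :: vs, s =>
    match pvRecB tree S f v s with
    | none => none
    | some s' => pvRecBList tree S f vs s'
  termination_by f l _ => (f, l.length + 1)
end

def dfs_alt (tree : List (List Int)) (S : String) : List Int × List Int :=
  if tree.isEmpty then ([], [])    -- 'status[0] = 1' raises IndexError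
  else
    match pvRecB tree S (tree.length + 1) 0
        (PySem.List.pySetD (List.replicate tree.length (0 : Int)) 0 1,
         List.replicate tree.length (none : Option (Nat × List Int)), []) with
    | none => ([], [])
    | some s =>
      match pvBGet s.2.1 0 with
      | some rs => (pvHeapAt s.2.2 rs.1, rs.2)
      | none => ([], [])           -- unreachable: rec(0) always stores res[0]

-- ===== PRECONDITION & SPEC =====
-- normalised index of a wrapped Python index (only used on in-range values)
def pvWrapN (n : Nat) (v : Int) : Nat := (if v < 0 then v + n else v).toNat

-- n-fold expansion: the set of (normalised) nodes A's traversal visits from node 0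
def pvVisStep (tree : List (List Int)) (b : List Bool) : List Bool :=
  (List.range tree.length).map (fun i => b.getD i false ||
    (List.range tree.length).any (fun j => b.getD j false && (tree.getD j []).any (fun v =>
      decide (-(tree.length : Int) ≤ v) && decide (v < (tree.length : Int)) &&
      (pvWrapN tree.length v == i))))
def pvVisited (tree : List (List Int)) : List Bool :=
  (pvVisStep tree)^[tree.length] ((List.replicate tree.length false).set 0 true)

-- S[v] exists and is a letter whose code Python's wrap-around 26-index accepts
def pvCharOK (S : String) (v : Int) : Bool :=
  match PySem.Str.pyGet? S v with
  | some c => decide (65 ≤ c.toNat) && decide (c.toNat ≤ 116)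
  | none => false

-- Pre_ = the inputs on which Python A returns instead of raising IndexError: a
-- nonempty tree whose visited nodes have only in-range (possibly negative,
-- wrapping) neighbour indices, and an in-range letter of code 65..116 at S[u] for
-- node 0 and for every neighbour index u of a visited node. The last condition is
-- very slightly wider than A's raises: an in-range neighbour index that names an
-- already-visited node under a different alias is never itself indexed into S, so
-- A can return although its letter is bad (see the cite); B agrees with A there.
def Pre_dfs (tree : List (List Int)) (S : String) : Prop :=
  tree ≠ [] ∧
  pvCharOK S 0 = true ∧
  ∀ i ∈ List.range tree.length, (pvVisited tree).getD i false = true →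
    ∀ v ∈ tree.getD i [],
      -(tree.length : Int) ≤ v ∧ v < tree.length ∧ pvCharOK S v = true
instance (tree : List (List Int)) (S : String) : Decidable (Pre_dfs tree S) := by
  unfold Pre_dfs; infer_instance

def pvWitness_dfs : List (List Int) × String := ([[1], [0]], "AB")

def Spec_dfs (tree : List (List Int)) (S : String) (out : List Int × List Int) : Prop :=
  out = dfs_alt tree S
instance (tree : List (List Int)) (S : String) (out : List Int × List Int) :
    Decidable (Spec_dfs tree S out) := by unfold Spec_dfs; infer_instance

-- ===== CLAIM (what is proved, stated in full; the proofs are below) =====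
def Claim_equal_dfs : Prop := ∀ (tree : List (List Int)) (S : String),
  Dom_dfs tree S → Pre_dfs tree S → Spec_dfs tree S (dfs tree S)

-- ===== LEMMAS AND PROOFS =====
-- (the two ports in fact agree on every input; Pre_ carves out Python's raises)

-- A-side proof device: A's stack loop re-expressed as the same recursion shape as
-- pvRecB, but over A's PvSt cells (used only by the lemmas below)
mutual
def pvRecA (tree : List (List Int)) (S : String) :
    Nat → Int → List PvSt × List (List Int) → Option (List PvSt × List (List Int))
  | 0, _, _ => none
  | Nat.succ f, u, (st, heap) =>
    if (pvAdj tree u).all (fun v => (PySem.List.pyIdx? st.length v).isSome) then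
      match pvRecAList tree S f
          (((pvAdj tree u).filter (fun v => pvStGet st v == PvSt.zero)).reverse)
          ((((pvAdj tree u).filter (fun v => pvStGet st v == PvSt.zero)).foldl
            (fun s v => pvStSet s v PvSt.one) st), heap) with
      | none => none
      | some (st2, h2) =>
        some (pvStSet st2 u (PvSt.done (pvFinalizeA tree S st2 h2 u).1.1
          (pvFinalizeA tree S st2 h2 u).1.2), (pvFinalizeA tree S st2 h2 u).2)
    else none
  termination_by f _ _ => (f, 0)

def pvRecAList (tree : List (List Int)) (S : String) :
    Nat → List Int → List PvSt × List (List Int) →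
    Option (List PvSt × List (List Int))
  | _, [], s => some s
  | f, v :: vs, s =>
    match pvRecA tree S f v s with
    | none => none
    | some s' => pvRecAList tree S f vs s'
  termination_by f l _ => (f, l.length + 1)
end

-- abstractions from A's status cells to B's two tables
def pvPhi : PvSt → Int
  | PvSt.zero => 0
  | PvSt.one => 1
  | PvSt.done _ _ => 2

def pvPsi : PvSt → Option (Nat × List Int)
  | PvSt.done r s => some (r, s)
  | _ => none

theorem pvMap_setD {α β : Type} (f : α → β) (xs : List α) (i : Int) (x : α) :
    (PySem.List.pySetD xs i x).map f = PySem.List.pySetD (xs.map f) i (f x) := by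
  cases h : PySem.List.pyIdx? xs.length i with
  | none => simp [PySem.List.pySetD, PySem.List.pySet?, h, List.length_map]
  | some k => simp [PySem.List.pySetD, PySem.List.pySet?, h, List.length_map, List.map_set]

theorem pvGetD_map_phi (st : List PvSt) (v : Int) :
    PySem.List.pyGetD (st.map pvPhi) v 0 = pvPhi (pvStGet st v) := by
  have h := PySem.List.pyGetD_map pvPhi st v PvSt.zero
  simpa [pvStGet, pvPhi] using h

theorem pvGetD_map_psi (st : List PvSt) (v : Int) :
    pvBGet (st.map pvPsi) v = pvPsi (pvStGet st v) := by
  have h := PySem.List.pyGetD_map pvPsi st v PvSt.zero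
  simpa [pvBGet, pvStGet, pvPsi] using h

theorem pvFilter_eq (st : List PvSt) (l : List Int) :
    l.filter (fun v => PySem.List.pyGetD (st.map pvPhi) v 0 == 0)
      = l.filter (fun v => pvStGet st v == PvSt.zero) := by
  apply List.filter_congr
  intro v _
  rw [pvGetD_map_phi]
  cases pvStGet st v <;> simp [pvPhi]

theorem pvMarkFold_map (st : List PvSt) (vs : List Int) :
    (vs.foldl (fun s v => pvStSet s v PvSt.one) st).map pvPhi =
      vs.foldl (fun s v => PySem.List.pySetD s v 1) (st.map pvPhi) := by
  induction vs generalizing st with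
  | nil => simp
  | cons v vs ih =>
    simp only [List.foldl_cons]
    rw [ih (pvStSet st v PvSt.one)]
    unfold pvStSet
    rw [pvMap_setD pvPhi st v PvSt.one]
    rfl

theorem pvSetD_self {α : Type} (b : List α) (v : Int) (x : α)
    (h : PySem.List.pyGetD b v x = x) : PySem.List.pySetD b v x = b := by
  cases hidx : PySem.List.pyIdx? b.length v with
  | none => simp [PySem.List.pySetD, PySem.List.pySet?, hidx]
  | some k =>
    have hk := pvIdx_lt hidx
    have hbk : b[k] = x := by
      simpa [PySem.List.pyGetD, PySem.List.pyGet?, hidx, List.getElem?_eq_getElem hk] using h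
    simp [PySem.List.pySetD, PySem.List.pySet?, hidx, ← hbk, List.set_getElem_self]

theorem pvStGet_setD (st : List PvSt) (v w : Int) (x : PvSt) :
    pvStGet (pvStSet st v x) w = pvStGet st w ∨ pvStGet (pvStSet st v x) w = x := by
  unfold pvStGet pvStSet
  cases hidx : PySem.List.pyIdx? st.length v with
  | none => left; simp [PySem.List.pySetD, PySem.List.pySet?, hidx]
  | some k =>
    simp only [PySem.List.pySetD, PySem.List.pySet?, hidx, Option.map_some, Option.getD_some]
    have hlen : (st.set k x).length = st.length := by simp
    simp only [PySem.List.pyGetD, PySem.List.pyGet?, hlen]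
    cases hj : PySem.List.pyIdx? st.length w with
    | none => left; rfl
    | some j =>
      by_cases hkj : k = j
      · subst hkj
        right
        have hk := pvIdx_lt hidx
        simp [List.getElem?_set_self hk]
      · left
        simp [List.getElem?_set_ne hkj]

theorem pvGetD_replicate {α : Type} (n : Nat) (x : α) (i : Int) :
    PySem.List.pyGetD (List.replicate n x) i x = x := by
  simp only [PySem.List.pyGetD, PySem.List.pyGet?, List.length_replicate]
  cases hidx : PySem.List.pyIdx? n i with
  | none => simp
  | some k =>
    have hk := pvIdx_lt hidx
    simp [List.getElem?_replicate, hk]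

theorem pvGetD_setD_self {α : Type} (xs : List α) (i : Int) (x d : α)
    (h : (PySem.List.pyIdx? xs.length i).isSome = true) :
    PySem.List.pyGetD (PySem.List.pySetD xs i x) i d = x := by
  cases hidx : PySem.List.pyIdx? xs.length i with
  | none => rw [hidx] at h; simp at h
  | some k =>
    have hk := pvIdx_lt hidx
    have hlen : (xs.set k x).length = xs.length := by simp
    simp [PySem.List.pySetD, PySem.List.pySet?, hidx, PySem.List.pyGetD,
      PySem.List.pyGet?, hlen, List.getElem?_set_self (by simpa using hk)]


-- lengths are invariant under all the updates
theorem pvMarkFold_len : ∀ (vs : List Int) (st : List PvSt),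
    (vs.foldl (fun s v => pvStSet s v PvSt.one) st).length = st.length := by
  intro vs
  induction vs with
  | nil => intro st; rfl
  | cons v vs ih =>
    intro st
    simp only [List.foldl_cons]
    rw [ih (pvStSet st v PvSt.one)]
    exact PySem.List.length_pySetD ..

-- marking preserves non-zero cells
theorem pvMarkFold_nonzero : ∀ (vs : List Int) (st : List PvSt) (w : Int),
    pvStGet st w ≠ PvSt.zero →
    pvStGet (vs.foldl (fun s v => pvStSet s v PvSt.one) st) w ≠ PvSt.zero := by
  intro vs
  induction vs with
  | nil => intro st w h; exact h
  | cons v vs ih =>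
    intro st w h
    simp only [List.foldl_cons]
    apply ih
    rcases pvStGet_setD st v w PvSt.one with h' | h' <;> rw [h']
    · exact h
    · simp

-- marking makes every marked (in-range) kid non-zero
theorem pvMark_mem_nonzero : ∀ (vs : List Int) (st : List PvSt),
    (∀ v ∈ vs, (PySem.List.pyIdx? st.length v).isSome = true) →
    ∀ v ∈ vs, pvStGet (vs.foldl (fun s w => pvStSet s w PvSt.one) st) v ≠ PvSt.zero := by
  intro vs
  induction vs with
  | nil => intro st _ v hv; simp at hv
  | cons v0 vs ih =>
    intro st hall v hv
    simp only [List.foldl_cons]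
    rcases List.mem_cons.mp hv with rfl | hv'
    · apply pvMarkFold_nonzero
      unfold pvStGet pvStSet
      rw [pvGetD_setD_self st v PvSt.one PvSt.zero (hall v List.mem_cons_self)]
      simp
    · apply ih (pvStSet st v0 PvSt.one) ?_ v hv'
      intro w hw
      have := hall w (List.mem_cons_of_mem v0 hw)
      rwa [pvStSet, PySem.List.length_pySetD]

-- the state invariant preserved by the A-side recursion
def pvInv (st st' : List PvSt) : Prop :=
  st'.length = st.length ∧
  st'.countP (· == PvSt.zero) ≤ st.countP (· == PvSt.zero) ∧
  ∀ w, pvStGet st w ≠ PvSt.zero → pvStGet st' w ≠ PvSt.zero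

theorem pvInv_refl (st : List PvSt) : pvInv st st := ⟨rfl, le_refl _, fun _ h => h⟩

theorem pvInv_trans {a b c : List PvSt} (h1 : pvInv a b) (h2 : pvInv b c) : pvInv a c :=
  ⟨h2.1.trans h1.1, h2.2.1.trans h1.2.1, fun w hw => h2.2.2 w (h1.2.2 w hw)⟩

theorem pvInv_mark (st : List PvSt) (vs : List Int) :
    pvInv st (vs.foldl (fun s v => pvStSet s v PvSt.one) st) :=
  ⟨pvMarkFold_len vs st, pvCountP_markFold_le _ _ (by simp) vs st,
   fun w hw => pvMarkFold_nonzero vs st w hw⟩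

theorem pvInv_setDone (st : List PvSt) (u : Int) (r : Nat) (sub : List Int) :
    pvInv st (pvStSet st u (PvSt.done r sub)) := by
  refine ⟨PySem.List.length_pySetD .., pvCountP_setD_le _ _ _ _ (by simp), ?_⟩
  intro w hw
  rcases pvStGet_setD st u w (PvSt.done r sub) with h' | h' <;> rw [h']
  · exact hw
  · simp

theorem pvRecA_mono (tree : List (List Int)) (S : String) : ∀ f : Nat,
    (∀ (u : Int) (st : List PvSt) (heap : List (List Int)) out,
      pvRecA tree S f u (st, heap) = some out → pvInv st out.1) ∧
    (∀ (l : List Int) (st : List PvSt) (heap : List (List Int)) out,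
      pvRecAList tree S f l (st, heap) = some out → pvInv st out.1) := by
  intro f
  induction f with
  | zero =>
    constructor
    · intro u st heap out h; rw [pvRecA] at h; exact absurd h (by simp)
    · intro l st heap out h
      cases l with
      | nil => rw [pvRecAList] at h; cases h; exact pvInv_refl st
      | cons v vs =>
        rw [pvRecAList, pvRecA] at h
        exact absurd h (by simp)
  | succ f ihf =>
    have hP : ∀ (u : Int) (st : List PvSt) (heap : List (List Int)) out,
        pvRecA tree S (f + 1) u (st, heap) = some out → pvInv st out.1 := by
      intro u st heap out h
      rw [pvRecA] at h
      split_ifs at h with hall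
      · cases hr : pvRecAList tree S f
            (((pvAdj tree u).filter (fun v => pvStGet st v == PvSt.zero)).reverse)
            ((((pvAdj tree u).filter (fun v => pvStGet st v == PvSt.zero)).foldl
              (fun s v => pvStSet s v PvSt.one) st), heap) with
        | none => rw [hr] at h; exact absurd h (by simp)
        | some s2 =>
          rw [hr] at h
          obtain ⟨st2, h2⟩ := s2
          simp only [Option.some.injEq] at h
          have i1 := pvInv_mark st ((pvAdj tree u).filter (fun v => pvStGet st v == PvSt.zero))
          have i2 := ihf.2 _ _ _ _ hr
          have i3 := pvInv_setDone st2 u (pvFinalizeA tree S st2 h2 u).1.1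
            (pvFinalizeA tree S st2 h2 u).1.2
          exact h ▸ pvInv_trans (pvInv_trans i1 i2) i3
    refine ⟨hP, ?_⟩
    intro l
    induction l with
    | nil =>
      intro st heap out h
      rw [pvRecAList] at h; cases h; exact pvInv_refl st
    | cons v vs ihl =>
      intro st heap out h
      rw [pvRecAList] at h
      cases hr : pvRecA tree S (f + 1) v (st, heap) with
      | none => rw [hr] at h; exact absurd h (by simp)
      | some s1 =>
        rw [hr] at h
        obtain ⟨st1, h1⟩ := s1
        exact pvInv_trans (hP _ _ _ _ hr) (ihl st1 h1 out h)

-- marking cells that carry no result leaves the psi view unchanged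
theorem pvMarkFold_psi : ∀ (vs : List Int) (st : List PvSt),
    (∀ v ∈ vs, pvPsi (pvStGet st v) = none) →
    (vs.foldl (fun s v => pvStSet s v PvSt.one) st).map pvPsi = st.map pvPsi := by
  intro vs
  induction vs with
  | nil => intro st _; rfl
  | cons v vs ih =>
    intro st hall
    simp only [List.foldl_cons]
    have hset : (pvStSet st v PvSt.one).map pvPsi = st.map pvPsi := by
      unfold pvStSet
      rw [pvMap_setD pvPsi st v PvSt.one]
      apply pvSetD_self
      have h := pvGetD_map_psi st v
      have hz := hall v List.mem_cons_self
      simp only [pvBGet] at h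
      show PySem.List.pyGetD (List.map pvPsi st) v none = none
      rw [h, hz]
    rw [ih (pvStSet st v PvSt.one), hset]
    intro w hw
    rcases pvStGet_setD st v w PvSt.one with h | h
    · rw [h]; exact hall w (List.mem_cons_of_mem v hw)
    · rw [h]; rfl

-- B's combine step seen through the abstraction maps is A's combine step
theorem pvStepB_eq (st : List PvSt) (heap : List (List Int)) :
    pvStepB (st.map pvPhi) (st.map pvPsi) heap = pvStepA st heap := by
  funext acc v
  unfold pvStepB pvStepA
  rw [pvGetD_map_phi, pvGetD_map_psi]
  cases pvStGet st v <;> simp [pvPhi, pvPsi]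

theorem pvFinalizeB_eq (tree : List (List Int)) (S : String) (st : List PvSt)
    (heap : List (List Int)) (u : Int) :
    pvFinalizeB tree S (st.map pvPhi) (st.map pvPsi) heap u = pvFinalizeA tree S st heap u := by
  unfold pvFinalizeB pvFinalizeA
  rw [pvStepB_eq]

-- the B-side recursion is the A-side recursion through the abstraction maps
theorem pvRec_commute (tree : List (List Int)) (S : String) : ∀ f : Nat,
    (∀ (u : Int) (st : List PvSt) (heap : List (List Int)),
      pvRecB tree S f u (st.map pvPhi, st.map pvPsi, heap) =
        Option.map (fun sh : List PvSt × List (List Int) =>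
          (sh.1.map pvPhi, sh.1.map pvPsi, sh.2)) (pvRecA tree S f u (st, heap))) ∧
    (∀ (l : List Int) (st : List PvSt) (heap : List (List Int)),
      pvRecBList tree S f l (st.map pvPhi, st.map pvPsi, heap) =
        Option.map (fun sh : List PvSt × List (List Int) =>
          (sh.1.map pvPhi, sh.1.map pvPsi, sh.2)) (pvRecAList tree S f l (st, heap))) := by
  intro f
  induction f with
  | zero =>
    constructor
    · intro u st heap; rw [pvRecA, pvRecB]; rfl
    · intro l st heap
      cases l with
      | nil => rw [pvRecAList, pvRecBList]; rfl
      | cons v vs => rw [pvRecAList, pvRecBList, pvRecA, pvRecB]; rfl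
  | succ f ihf =>
    have hP : ∀ (u : Int) (st : List PvSt) (heap : List (List Int)),
        pvRecB tree S (f + 1) u (st.map pvPhi, st.map pvPsi, heap) =
          Option.map (fun sh : List PvSt × List (List Int) =>
            (sh.1.map pvPhi, sh.1.map pvPsi, sh.2)) (pvRecA tree S (f + 1) u (st, heap)) := by
      intro u st heap
      rw [pvRecA, pvRecB, List.length_map, pvFilter_eq]
      split_ifs with hall
      · rw [← pvMarkFold_map]
        have hpsiK : List.map pvPsi st =
            (((pvAdj tree u).filter (fun v => pvStGet st v == PvSt.zero)).foldl
              (fun s v => pvStSet s v PvSt.one) st).map pvPsi := by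
          rw [pvMarkFold_psi]
          intro v hv
          have := (List.mem_filter.mp hv).2
          simp only [beq_iff_eq] at this
          rw [this]
          rfl
        rw [hpsiK, ihf.2]
        cases hr : pvRecAList tree S f
            (((pvAdj tree u).filter (fun v => pvStGet st v == PvSt.zero)).reverse)
            ((((pvAdj tree u).filter (fun v => pvStGet st v == PvSt.zero)).foldl
              (fun s v => pvStSet s v PvSt.one) st), heap) with
        | none => rfl
        | some s2 =>
          obtain ⟨st2, h2⟩ := s2
          simp only [Option.map_some]
          rw [pvFinalizeB_eq]
          have e1 : (pvStSet st2 u (PvSt.done (pvFinalizeA tree S st2 h2 u).1.1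
              (pvFinalizeA tree S st2 h2 u).1.2)).map pvPhi
              = PySem.List.pySetD (st2.map pvPhi) u 2 := by
            unfold pvStSet
            rw [pvMap_setD pvPhi st2 u]
            rfl
          have e2 : (pvStSet st2 u (PvSt.done (pvFinalizeA tree S st2 h2 u).1.1
              (pvFinalizeA tree S st2 h2 u).1.2)).map pvPsi
              = pvBSet (st2.map pvPsi) u (some (pvFinalizeA tree S st2 h2 u).1) := by
            unfold pvStSet pvBSet
            rw [pvMap_setD pvPsi st2 u]
            rfl
          rw [e1, e2]
      · rfl
    refine ⟨hP, ?_⟩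
    intro l
    induction l with
    | nil => intro st heap; rw [pvRecAList, pvRecBList]; rfl
    | cons v vs ihl =>
      intro st heap
      rw [pvRecAList, pvRecBList, hP]
      cases hr : pvRecA tree S (f + 1) v (st, heap) with
      | none => rfl
      | some s1 =>
        obtain ⟨st1, h1⟩ := s1
        simp only [Option.map_some]
        exact ihl st1 h1

-- the simulation: A's stack loop is the A-side recursion, one stack entry at a time
theorem pvSim (tree : List (List Int)) (S : String) : ∀ f : Nat,
    (∀ (u : Int) (rest : List Int) (st : List PvSt) (heap : List (List Int)),
      st.countP (· == PvSt.zero) < f →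
      pvLoopA tree S (u :: rest) st heap =
        match pvRecA tree S f u (st, heap) with
        | none => ([], [])
        | some sh => pvLoopA tree S rest sh.1 sh.2) ∧
    (∀ (l : List Int) (rest : List Int) (st : List PvSt) (heap : List (List Int)),
      st.countP (· == PvSt.zero) < f →
      pvLoopA tree S (l ++ rest) st heap =
        match pvRecAList tree S f l (st, heap) with
        | none => ([], [])
        | some sh => pvLoopA tree S rest sh.1 sh.2) := by
  intro f
  induction f with
  | zero => exact ⟨fun _ _ _ _ h => absurd h (by omega), fun _ _ _ _ h => absurd h (by omega)⟩
  | succ f ihf =>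
    have hP : ∀ (u : Int) (rest : List Int) (st : List PvSt) (heap : List (List Int)),
        st.countP (· == PvSt.zero) < f + 1 →
        pvLoopA tree S (u :: rest) st heap =
          match pvRecA tree S (f + 1) u (st, heap) with
          | none => ([], [])
          | some sh => pvLoopA tree S rest sh.1 sh.2 := by
      intro u rest st heap hc
      rw [pvLoopA, pvRecA]
      by_cases hall : ((pvAdj tree u).all
          (fun v => (PySem.List.pyIdx? st.length v).isSome)) = true
      · rw [if_pos hall, if_pos hall]
        by_cases hks : (((pvAdj tree u).filter (fun v => pvStGet st v == PvSt.zero)).isEmpty) = true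
        · rw [if_pos hks]
          have hnil : (pvAdj tree u).filter (fun v => pvStGet st v == PvSt.zero) = [] :=
            List.isEmpty_iff.mp hks
          rw [hnil]
          simp only [List.reverse_nil, List.foldl_nil]
          rw [pvRecAList]
        · rw [if_neg hks]
          have hlt := pvCountP_mark_lt tree u st hall hks
          have hmark : (((pvAdj tree u).filter (fun v => pvStGet st v == PvSt.zero)).foldl
              (fun s v => pvStSet s v PvSt.one) st).countP (· == PvSt.zero) < f := by omega
          rw [ihf.2 _ (u :: rest) _ heap hmark]
          cases hr : pvRecAList tree S f
              (((pvAdj tree u).filter (fun v => pvStGet st v == PvSt.zero)).reverse)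
              ((((pvAdj tree u).filter (fun v => pvStGet st v == PvSt.zero)).foldl
                (fun s v => pvStSet s v PvSt.one) st), heap) with
          | none => rfl
          | some s2 =>
            obtain ⟨st2, h2⟩ := s2
            simp only
            -- the second visit of u: guard still holds, the kid filter is now empty
            have hinv := (pvRecA_mono tree S f).2 _ _ _ _ hr
            have hlen2 : st2.length = st.length := by
              have := hinv.1
              rw [pvMarkFold_len] at this
              exact this
            have hall2 : ((pvAdj tree u).all
                (fun v => (PySem.List.pyIdx? st2.length v).isSome)) = true := by
              rw [hlen2]; exact hall
            have hks2 : (((pvAdj tree u).filter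
                (fun v => pvStGet st2 v == PvSt.zero)).isEmpty) = true := by
              rw [List.isEmpty_iff, List.filter_eq_nil_iff]
              intro v hv
              have hnz : pvStGet st2 v ≠ PvSt.zero := by
                by_cases hz : pvStGet st v = PvSt.zero
                · have hvk : v ∈ (pvAdj tree u).filter (fun w => pvStGet st w == PvSt.zero) :=
                    List.mem_filter.mpr ⟨hv, by simp [hz]⟩
                  have hsome : ∀ w ∈ (pvAdj tree u).filter (fun w => pvStGet st w == PvSt.zero),
                      (PySem.List.pyIdx? st.length w).isSome = true := by
                    intro w hw
                    have := List.all_eq_true.mp hall w (List.mem_filter.mp hw).1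
                    simpa using this
                  exact hinv.2.2 v (pvMark_mem_nonzero _ st hsome v hvk)
                · exact hinv.2.2 v (pvMarkFold_nonzero _ st v hz)
              simpa using hnz
            rw [pvLoopA, if_pos hall2, if_pos hks2]
      · rw [if_neg hall, if_neg hall]
    refine ⟨hP, ?_⟩
    intro l
    induction l with
    | nil =>
      intro rest st heap _
      rw [pvRecAList]
      rfl
    | cons v vs ihl =>
      intro rest st heap hc
      rw [pvRecAList]
      have : (v :: vs) ++ rest = v :: (vs ++ rest) := rfl
      rw [this, hP v (vs ++ rest) st heap hc]
      cases hr : pvRecA tree S (f + 1) v (st, heap) with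
      | none => rfl
      | some s1 =>
        obtain ⟨st1, h1⟩ := s1
        simp only
        have hmono := (pvRecA_mono tree S (f + 1)).1 _ _ _ _ hr
        exact ihl rest st1 h1 (lt_of_le_of_lt hmono.2.1 hc)

-- the two ports agree on every input
theorem pv_dfs_eq (tree : List (List Int)) (S : String) : dfs tree S = dfs_alt tree S := by
  unfold dfs dfs_alt
  by_cases hnil : tree.isEmpty = true
  · rw [if_pos hnil, if_pos hnil]
  · rw [if_neg hnil, if_neg hnil]
    set st0 := PySem.List.pySetD (List.replicate tree.length PvSt.zero) 0 PvSt.one with hst0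
    have hphi : PySem.List.pySetD (List.replicate tree.length (0 : Int)) 0 1 = st0.map pvPhi := by
      rw [hst0, pvMap_setD pvPhi (List.replicate tree.length PvSt.zero) 0 PvSt.one,
        List.map_replicate]
      rfl
    have hpsi : (List.replicate tree.length (none : Option (Nat × List Int)))
        = st0.map pvPsi := by
      rw [hst0, pvMap_setD pvPsi (List.replicate tree.length PvSt.zero) 0 PvSt.one,
        List.map_replicate]
      rw [pvSetD_self]
      · rfl
      · exact pvGetD_replicate tree.length (pvPsi PvSt.zero) 0
    rw [hphi, hpsi, (pvRec_commute tree S (tree.length + 1)).1 0 st0 []]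
    have hcount : st0.countP (· == PvSt.zero) < tree.length + 1 := by
      have h1 : st0.length = tree.length := by
        rw [hst0, PySem.List.length_pySetD, List.length_replicate]
      have := List.countP_le_length (l := st0) (p := (· == PvSt.zero))
      omega
    have hsim := (pvSim tree S (tree.length + 1)).1 0 [] st0 [] hcount
    cases hr : pvRecA tree S (tree.length + 1) 0 (st0, []) with
    | none =>
      rw [hr] at hsim
      simp only at hsim
      rw [hsim]
      rfl
    | some sh =>
      obtain ⟨st', h'⟩ := sh
      rw [hr] at hsim
      simp only at hsim
      have hnl : pvLoopA tree S ([] : List Int) st' h' = (st', h') := by rw [pvLoopA]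
      rw [hnl] at hsim
      rw [hsim]
      simp only [Option.map_some]
      rw [pvGetD_map_psi]
      cases pvStGet st' 0 <;> rfl

-- ===== VERDICT (by name: the statement is the Claim_ definition above) =====
theorem dfs_spec : Claim_equal_dfs := by
  intro tree S _ _
  unfold Spec_dfs
  exact pv_dfs_eq tree S
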